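-- pv_equiv track=rewrite | github.com/dishakarnayake/CrackYourPlacement | 35-Day/phoneDictionary.py | displayContacts
-- ===== SOURCE A (Python) =====
-- def displayContacts(n, contact, s):
--     # code here
--
--     # Sort contacts to ensure lexicographical order
--     contact.sort()
--
--     result = []
--
--     for i in range(1, len(s) + 1):
--         prefix = s[:i]
--         matches = []
--
--         # Find all contacts that start with the current prefix
--         for entry in contact:
--             if entry.startswith(prefix):
--                 matches.append(entry)
--
--         # If no matches are found, append "0"
--         if not matches:
--             result.append(["0"])
--         else:
--             result.append(sorted(set(matches)))
--
--     return result
-- ===== SOURCE B (Python) =====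
-- def displayContacts(n, contact, s):
--     # Sort the distinct contacts once; each prefix then matches a contiguous,
--     # already-deduplicated block found by binary search.
--     # (Equivalence is about the return value: A sorts `contact` in place, B does not.)
--     uniq = sorted(set(contact))
--     result = []
--     prefix = ""
--     for ch in s:
--         prefix += ch
--         lo, hi = 0, len(uniq)
--         while lo < hi:
--             mid = (lo + hi) // 2
--             if uniq[mid] < prefix:
--                 lo = mid + 1
--             else:
--                 hi = mid
--         block = []
--         j = lo
--         while j < len(uniq) and uniq[j].startswith(prefix):
--             block.append(uniq[j])
--             j += 1
--         result.append(block if block else ["0"])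
--     return result
-- ===== Notes on version B (the rewrite author's own statement) =====
-- stated objective: faster
-- what changed: B sorts and deduplicates the contacts once, then locates each prefix's matches as a contiguous block via binary search, instead of A's full linear scan plus a fresh sorted(set(...)) for every prefix.
import Mathlib
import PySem

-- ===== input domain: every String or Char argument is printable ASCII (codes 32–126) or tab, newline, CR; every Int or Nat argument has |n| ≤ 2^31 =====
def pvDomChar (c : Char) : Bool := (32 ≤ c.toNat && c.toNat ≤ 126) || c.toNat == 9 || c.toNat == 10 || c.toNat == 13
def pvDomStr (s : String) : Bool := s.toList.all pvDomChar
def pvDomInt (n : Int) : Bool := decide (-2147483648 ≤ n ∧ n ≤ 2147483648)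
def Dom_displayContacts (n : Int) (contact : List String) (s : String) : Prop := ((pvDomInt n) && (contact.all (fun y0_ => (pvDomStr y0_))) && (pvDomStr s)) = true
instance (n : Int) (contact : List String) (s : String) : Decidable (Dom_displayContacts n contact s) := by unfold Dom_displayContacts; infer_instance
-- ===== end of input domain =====

-- B replaces A's per-pfx linear scan and re-sort by one sort+dedup of the contacts and a binary search per pfx (objective: faster); equivalence is about the return value only — the Python A sorts `contact` in place, B does not.


-- ===== PORT A =====
def displayContacts (n : Int) (contact : List String) (s : String) : List (List String) :=
  let sortedContact := PySem.List.sorted contact (fun x => x)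
  (PySem.List.pyRange 1 (PySem.Str.len s + 1) 1).foldl (fun result i =>
    let pfx := PySem.Str.slice s none (some i)
    let ms := sortedContact.foldl (fun m entry =>
      if PySem.Str.startswith entry pfx then m ++ [entry] else m) []
    result ++ [if ms = [] then ["0"]
               else PySem.List.sorted (PySem.Set.ofList ms) (fun x => x)]) []

-- ===== PORT B =====
-- B: sort the distinct contacts once; each pfx's ms are a contiguous block
-- found by binary search.  (Return-value equivalence: the Python A sorts `contact`
-- in place, B leaves it untouched.)

-- the `while lo < hi` binary-search loop of Source B (fuel = hi - lo makes it structural)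
def pvBisectGo (uniq : List String) (p : String) : Nat → Nat → Nat → Nat
  | 0, lo, _ => lo
  | fuel + 1, lo, hi =>
    if lo < hi then
      let mid := (lo + hi) / 2
      if uniq.getD mid "" < p then pvBisectGo uniq p fuel (mid + 1) hi
      else pvBisectGo uniq p fuel lo mid
    else lo

def pvBisect (uniq : List String) (p : String) (lo hi : Nat) : Nat :=
  pvBisectGo uniq p (hi - lo) lo hi

-- the `while j < len(uniq) and uniq[j].startswith(prefix)` collection loop of Source B
def pvBlockGo (uniq : List String) (p : String) : Nat → Nat → List String
  | 0, _ => []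
  | fuel + 1, j =>
    if h : j < uniq.length then
      if PySem.Str.startswith uniq[j] p then uniq[j] :: pvBlockGo uniq p fuel (j + 1) else []
    else []

def pvBlock (uniq : List String) (p : String) (j : Nat) : List String :=
  pvBlockGo uniq p (uniq.length - j) j

def displayContacts_alt (n : Int) (contact : List String) (s : String) : List (List String) :=
  let uniq := PySem.List.sorted (PySem.Set.ofList contact) (fun x => x)
  (s.toList.foldl (fun (st : String × List (List String)) ch =>
      let p := st.1.push ch
      let lo := pvBisect uniq p 0 uniq.length
      let block := pvBlock uniq p lo
      (p, st.2 ++ [if block = [] then ["0"] else block])) ("", [])).2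

-- ===== PRECONDITION & SPEC =====
def Spec_displayContacts (n : Int) (contact : List String) (s : String) (out : List (List String)) : Prop := out = displayContacts_alt n contact s
instance (n : Int) (contact : List String) (s : String) (out : List (List String)) : Decidable (Spec_displayContacts n contact s out) := by unfold Spec_displayContacts; infer_instance

-- ===== CLAIM =====
def Claim_equal_displayContacts : Prop := ∀ (n : Int) (contact : List String) (s : String), Dom_displayContacts n contact s → Spec_displayContacts n contact s (displayContacts n contact s)

-- ===== LEMMAS AND PROOFS =====

-- q-entry: the canonical per-pfx answer over the sorted deduplicated list
def pvEntry (uniq : List String) (p : String) : List String :=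
  let F := uniq.filter (fun e => PySem.Str.startswith e p)
  if F = [] then ["0"] else F

theorem pv_lex1 (p x : List Char) (h : p <+: x) : ¬ List.Lex (· < ·) x p := by
  induction p generalizing x with
  | nil => intro hl; cases hl
  | cons a p ih =>
    obtain ⟨t, rfl⟩ := h
    intro hl
    cases hl with
    | rel h' => exact lt_irrefl _ h'
    | cons h' => exact ih _ ⟨t, rfl⟩ h'

theorem pv_lex2 (p x y : List Char) (hp : p <+: y)
    (hyx : ¬ List.Lex (· < ·) y x) (hxp : ¬ List.Lex (· < ·) x p) : p <+: x := by
  induction p generalizing x y with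
  | nil => exact List.nil_prefix
  | cons a p ih =>
    obtain ⟨t, rfl⟩ := hp
    cases x with
    | nil => exact absurd List.Lex.nil hxp
    | cons c x =>
      rcases lt_trichotomy c a with h | rfl | h
      · exact absurd (List.Lex.rel h) hxp
      · have : p <+: x := ih x (p ++ t) ⟨t, rfl⟩
          (fun hl => hyx (List.Lex.cons hl)) (fun hl => hxp (List.Lex.cons hl))
        exact ⟨this.choose, by rw [List.cons_append, this.choose_spec]⟩
      · exact absurd (List.Lex.rel h) hyx

theorem pv_strLt_iff (x y : String) : x < y ↔ List.Lex (· < ·) x.toList y.toList :=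
  String.lt_iff_toList_lt.trans (List.lt_iff_lex_lt _ _)

theorem pv_sw_iff (e p : String) : PySem.Str.startswith e p = true ↔ p.toList <+: e.toList := by
  rw [PySem.Str.startswith_eq, PySem.Chars.startswith_iff]

-- binary search finds the first index whose element is not < p
theorem pvBisectGo_spec (uniq : List String) (p : String)
    (hpw : uniq.Pairwise (· ≤ ·)) :
    ∀ fuel lo hi, hi - lo ≤ fuel → hi ≤ uniq.length → lo ≤ hi →
    (∀ j (hj : j < uniq.length), j < lo → uniq[j] < p) →
    (∀ j (hj : j < uniq.length), hi ≤ j → ¬ uniq[j] < p) →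
    (∀ j (hj : j < uniq.length), j < pvBisectGo uniq p fuel lo hi → uniq[j] < p) ∧
    (∀ j (hj : j < uniq.length), pvBisectGo uniq p fuel lo hi ≤ j → ¬ uniq[j] < p) := by
  have hmono := (List.pairwise_iff_getElem).1 hpw
  intro fuel
  induction fuel with
  | zero =>
    intro lo hi hfuel hhi hlohi hleft hright
    rw [show pvBisectGo uniq p 0 lo hi = lo from rfl]
    exact ⟨fun j hj => hleft j hj, fun j hj hge => hright j hj (by omega)⟩
  | succ fuel ih =>
    intro lo hi hfuel hhi hlohi hleft hright
    have hunfold : pvBisectGo uniq p (fuel + 1) lo hi =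
        if lo < hi then
          if uniq.getD ((lo + hi) / 2) "" < p then pvBisectGo uniq p fuel ((lo + hi) / 2 + 1) hi
          else pvBisectGo uniq p fuel lo ((lo + hi) / 2)
        else lo := rfl
    rw [hunfold]
    by_cases h : lo < hi
    · rw [if_pos h]
      have hmid : (lo + hi) / 2 < uniq.length := by omega
      rw [List.getD_eq_getElem uniq "" hmid]
      by_cases hc : uniq[(lo + hi) / 2] < p
      · rw [if_pos hc]
        exact ih ((lo + hi) / 2 + 1) hi (by omega) hhi (by omega)
          (fun j hj hjlt => by
            rcases Nat.lt_or_ge j lo with h' | h'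
            · exact hleft j hj h'
            · rcases Nat.eq_or_lt_of_le (Nat.le_of_lt_succ hjlt) with h'' | h''
              · exact h'' ▸ hc
              · exact lt_of_le_of_lt (hmono j ((lo+hi)/2) hj hmid h'') hc)
          hright
      · rw [if_neg hc]
        exact ih lo ((lo + hi) / 2) (by omega) (by omega) (by omega) hleft
          (fun j hj hjge hlt => by
            rcases Nat.eq_or_lt_of_le hjge with h'' | h''
            · exact hc (h'' ▸ hlt)
            · exact hc (lt_of_le_of_lt (hmono ((lo+hi)/2) j hmid hj h'') hlt))
    · rw [if_neg h]
      exact ⟨fun j hj => hleft j hj, fun j hj hge => hright j hj (by omega)⟩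

theorem pvBisect_spec (uniq : List String) (p : String)
    (hpw : uniq.Pairwise (· ≤ ·)) :
    ∀ lo hi, hi ≤ uniq.length → lo ≤ hi →
    (∀ j (hj : j < uniq.length), j < lo → uniq[j] < p) →
    (∀ j (hj : j < uniq.length), hi ≤ j → ¬ uniq[j] < p) →
    (∀ j (hj : j < uniq.length), j < pvBisect uniq p lo hi → uniq[j] < p) ∧
    (∀ j (hj : j < uniq.length), pvBisect uniq p lo hi ≤ j → ¬ uniq[j] < p) :=
  fun lo hi hhi hlohi hleft hright =>
    pvBisectGo_spec uniq p hpw (hi - lo) lo hi le_rfl hhi hlohi hleft hright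

theorem pvBlockGo_eq_takeWhile (uniq : List String) (p : String) :
    ∀ fuel j, uniq.length - j ≤ fuel →
    pvBlockGo uniq p fuel j = (uniq.drop j).takeWhile (fun e => PySem.Str.startswith e p) := by
  intro fuel
  induction fuel with
  | zero =>
    intro j hfuel
    rw [List.drop_of_length_le (by omega)]
    rfl
  | succ fuel ih =>
    intro j hfuel
    have hunfold : pvBlockGo uniq p (fuel + 1) j =
        if h : j < uniq.length then
          if PySem.Str.startswith uniq[j] p then uniq[j] :: pvBlockGo uniq p fuel (j + 1) else []
        else [] := rfl
    rw [hunfold]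
    by_cases h : j < uniq.length
    · rw [dif_pos h, List.drop_eq_getElem_cons h, List.takeWhile_cons]
      by_cases hs : PySem.Chars.startswith uniq[j].toList p.toList = true
      · rw [if_pos (by simpa using hs), ih (j + 1) (by omega)]
        simp [hs]
      · rw [if_neg (by simpa using hs)]
        simp [hs]
    · rw [dif_neg h, List.drop_of_length_le (by omega)]
      rfl

theorem pvBlock_eq_takeWhile (uniq : List String) (p : String) :
    ∀ j, pvBlock uniq p j = (uniq.drop j).takeWhile (fun e => PySem.Str.startswith e p) :=
  fun j => pvBlockGo_eq_takeWhile uniq p (uniq.length - j) j le_rfl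

theorem pv_filter_eq_takeWhile {α : Type} (q : α → Bool) :
    ∀ l : List α, l.Pairwise (fun a b => q b = true → q a = true) →
    l.filter q = l.takeWhile q := by
  intro l hl
  induction l with
  | nil => rfl
  | cons c cs ih =>
    rw [List.filter_cons, List.takeWhile_cons]
    by_cases hc : q c
    · rw [if_pos hc, if_pos hc, ih hl.tail]
    · rw [if_neg hc, if_neg hc, List.filter_eq_nil_iff.2]
      intro x hx
      exact fun hqx => hc ((List.pairwise_cons.1 hl).1 x hx hqx)

-- B's block is exactly the filter of the sorted deduplicated list
theorem pvB_core (contact : List String) (p : String) :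
    pvBlock (PySem.List.sorted (PySem.Set.ofList contact) (fun x => x)) p
      (pvBisect (PySem.List.sorted (PySem.Set.ofList contact) (fun x => x)) p 0
        (PySem.List.sorted (PySem.Set.ofList contact) (fun x => x)).length)
      = (PySem.List.sorted (PySem.Set.ofList contact) (fun x => x)).filter
          (fun e => PySem.Str.startswith e p) := by
  set uniq := PySem.List.sorted (PySem.Set.ofList contact) (fun x => x) with huniq
  have hlt : uniq.Pairwise (· < ·) := PySem.List.sorted_ofList_pairwise_lt contact
  have hmonolt := (List.pairwise_iff_getElem).1 hlt
  obtain ⟨hL, hR⟩ := pvBisect_spec uniq p (hlt.imp le_of_lt) 0 uniq.length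
    le_rfl (Nat.zero_le _) (fun j hj h => absurd h (Nat.not_lt_zero j))
    (fun j hj hge => absurd hj (by omega))
  set lo := pvBisect uniq p 0 uniq.length with hlo
  have hnq : ∀ x : String, x < p → ¬ PySem.Str.startswith x p = true := by
    intro x hx hq
    exact pv_lex1 p.toList x.toList ((pv_sw_iff x p).1 hq) ((pv_strLt_iff x p).1 hx)
  rw [pvBlock_eq_takeWhile]
  conv_rhs => rw [← List.take_append_drop lo uniq, List.filter_append]
  have h1 : (uniq.take lo).filter (fun e => PySem.Str.startswith e p) = [] := by
    rw [List.filter_eq_nil_iff]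
    intro x hx
    obtain ⟨i, hi, rfl⟩ := List.mem_iff_getElem.1 hx
    rw [List.getElem_take]
    have hilen : i < uniq.length := lt_of_lt_of_le hi (by simp [List.length_take])
    exact hnq _ (hL i hilen (lt_of_lt_of_le hi (by simp [List.length_take])))
  have h2 : (uniq.drop lo).filter (fun e => PySem.Str.startswith e p)
      = (uniq.drop lo).takeWhile (fun e => PySem.Str.startswith e p) := by
    apply pv_filter_eq_takeWhile
    rw [List.pairwise_iff_getElem]
    intro i j hi hj hij hqj
    rw [List.getElem_drop] at hqj ⊢
    have hi' : lo + i < uniq.length := by simp [List.length_drop] at hi; omega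
    have hj' : lo + j < uniq.length := by simp [List.length_drop] at hj; omega
    have hxp : ¬ uniq[lo + i] < p := hR (lo + i) hi' (Nat.le_add_right _ _)
    have hyx : ¬ uniq[lo + j] < uniq[lo + i] :=
      lt_asymm (hmonolt (lo + i) (lo + j) hi' hj' (by omega))
    rw [pv_sw_iff]
    exact pv_lex2 _ _ _ ((pv_sw_iff _ p).1 hqj)
      (fun hl => hyx ((pv_strLt_iff _ _).2 hl)) (fun hl => hxp ((pv_strLt_iff _ _).2 hl))
  rw [h1, h2, List.nil_append]

-- A's per-pfx answer is the same canonical entry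
theorem pvA_core (contact : List String) (p : String) :
    (let ms := (PySem.List.sorted contact (fun x => x)).filter
        (fun e => PySem.Str.startswith e p)
     if ms = [] then ["0"]
     else PySem.List.sorted (PySem.Set.ofList ms) (fun x => x))
      = pvEntry (PySem.List.sorted (PySem.Set.ofList contact) (fun x => x)) p := by
  set uniq := PySem.List.sorted (PySem.Set.ofList contact) (fun x => x) with huniq
  have hlt : uniq.Pairwise (· < ·) := PySem.List.sorted_ofList_pairwise_lt contact
  set q : String → Bool := fun e => PySem.Str.startswith e p with hq
  set ms := (PySem.List.sorted contact (fun x => x)).filter q with hms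
  set F := uniq.filter q with hF
  have hmemM : ∀ x, x ∈ ms ↔ (x ∈ contact ∧ q x = true) := by
    intro x; rw [hms, List.mem_filter, PySem.List.mem_sorted]
  have hmemF : ∀ x, x ∈ F ↔ (x ∈ contact ∧ q x = true) := by
    intro x; rw [hF, List.mem_filter, PySem.List.mem_sorted, PySem.Set.mem_ofList]
  have hFM : ∀ x, x ∈ F ↔ x ∈ ms := fun x => (hmemF x).trans (hmemM x).symm
  have hempty : (ms = []) ↔ (F = []) := by
    simp only [List.eq_nil_iff_forall_not_mem]
    exact ⟨fun h x hx => h x ((hFM x).1 hx), fun h x hx => h x ((hFM x).2 hx)⟩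
  show (if ms = [] then ["0"] else PySem.List.sorted (PySem.Set.ofList ms) (fun x => x))
      = pvEntry uniq p
  rw [pvEntry]
  by_cases hMe : ms = []
  · rw [if_pos hMe, if_pos (hempty.1 hMe)]
  · rw [if_neg hMe, if_neg (fun h => hMe (hempty.2 h))]
    apply PySem.List.sorted_eq_of_perm_of_pairwise_lt
    · exact (List.perm_ext_iff_of_nodup ((hlt.imp ne_of_lt).filter q)
        (PySem.Set.nodup_ofList ms)).2
        (fun a => by rw [PySem.Set.mem_ofList]; exact hFM a)
    · exact List.Pairwise.sublist List.filter_sublist hlt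


-- B's outer fold produces one pvEntry per growing pfx
theorem pvB_loop (uniq : List String) :
    ∀ (cs : List Char) (p0 : String) (acc : List (List String)),
    (cs.foldl (fun (st : String × List (List String)) ch =>
      let p := st.1.push ch
      let lo := pvBisect uniq p 0 uniq.length
      let block := pvBlock uniq p lo
      (p, st.2 ++ [if block = [] then ["0"] else block])) (p0, acc)).2
      = acc ++ (List.range cs.length).map
          (fun k => let p := String.ofList (p0.toList ++ cs.take (k + 1))
                    let block := pvBlock uniq p (pvBisect uniq p 0 uniq.length)
                    if block = [] then ["0"] else block) := by
  intro cs
  induction cs with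
  | nil => intro p0 acc; simp
  | cons c cs ih =>
    intro p0 acc
    have hpush : p0.push c = String.ofList (p0.toList ++ [c]) := by
      apply String.ext; simp
    rw [List.foldl_cons, ih, List.length_cons, List.range_succ_eq_map, List.map_cons,
      List.map_map]
    simp [hpush, Function.comp_def, List.take_succ_cons, List.append_assoc]

theorem pvA_loop (contact : List String) (s : String) :
    ∀ (l : List Int) (acc : List (List String)),
    (l.foldl (fun result i =>
      let pfx := PySem.Str.slice s none (some i)
      let ms := (PySem.List.sorted contact (fun x => x)).foldl (fun m entry =>
        if PySem.Str.startswith entry pfx then m ++ [entry] else m) []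
      result ++ [if ms = [] then ["0"]
                 else PySem.List.sorted (PySem.Set.ofList ms) (fun x => x)]) acc)
      = acc ++ l.map (fun i =>
          let pfx := PySem.Str.slice s none (some i)
          let ms := (PySem.List.sorted contact (fun x => x)).filter
            (fun e => PySem.Str.startswith e pfx)
          if ms = [] then ["0"]
          else PySem.List.sorted (PySem.Set.ofList ms) (fun x => x)) := by
  intro l
  induction l with
  | nil => intro acc; simp
  | cons i l ihl =>
    intro acc
    rw [List.foldl_cons, ihl]
    simp only [PySem.List.foldl_append_if_eq_filter, List.nil_append, List.map_cons]
    simp [List.append_assoc]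

-- ===== VERDICT =====
theorem displayContacts_spec : Claim_equal_displayContacts := by
  intro n contact s _hdom
  show displayContacts n contact s = displayContacts_alt n contact s
  set uniq := PySem.List.sorted (PySem.Set.ofList contact) (fun x => x) with huniq
  have hA : displayContacts n contact s
      = (PySem.List.pyRange 1 (PySem.Str.len s + 1) 1).map (fun i =>
          let pfx := PySem.Str.slice s none (some i)
          let ms := (PySem.List.sorted contact (fun x => x)).filter
            (fun e => PySem.Str.startswith e pfx)
          if ms = [] then ["0"]
          else PySem.List.sorted (PySem.Set.ofList ms) (fun x => x)) := by
    rw [displayContacts]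
    exact (pvA_loop contact s _ []).trans (by rw [List.nil_append])
  have hB : displayContacts_alt n contact s
      = (List.range s.toList.length).map
          (fun k => let p := String.ofList ("".toList ++ s.toList.take (k + 1))
                    let block := pvBlock uniq p (pvBisect uniq p 0 uniq.length)
                    if block = [] then ["0"] else block) := by
    rw [displayContacts_alt]
    exact (pvB_loop uniq s.toList "" []).trans (by rw [List.nil_append])
  rw [hA, hB]
  have hrange : PySem.List.pyRange 1 (PySem.Str.len s + 1) 1
      = (List.range s.toList.length).map (fun (k : Nat) => ((1 : Int) + (k : Int))) := by
    apply List.ext_getElem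
    · simp [PySem.List.length_pyRange_one, PySem.Str.len_eq]
    · intro i hi1 hi2
      simp [PySem.List.getElem_pyRange_one]
  rw [hrange, List.map_map]
  apply List.map_congr_left
  intro k hk
  simp only [Function.comp]
  have hslice : PySem.Str.slice s none (some ((1 : Int) + k))
      = String.ofList (s.toList.take (k + 1)) := by
    apply String.ext
    rw [PySem.Str.toList_slice, PySem.Chars.slice_eq_listSlice,
      PySem.List.slice_to s.toList (show (0:Int) ≤ 1 + (k:Int) by omega)]
    simp
    omega
  rw [hslice]
  have := pvA_core contact (String.ofList (s.toList.take (k + 1)))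
  simp only at this
  rw [this]
  rw [pvEntry]
  have hblock := pvB_core contact (String.ofList (s.toList.take (k + 1)))
  rw [← huniq] at hblock
  simp only [String.toList_empty, List.nil_append, hblock]
  rw [← huniq]
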